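-- pv_equiv track=rewrite | github.com/gso-bench/scaffolds | openhands_gso/helpers.py | process_git_patch
-- ===== SOURCE A (Python) =====
-- def process_git_patch(patch: str) -> str:
--     """Clean a git patch: strip control characters, normalize line endings."""
--     if not isinstance(patch, str):
--         return ""
--     if not patch.strip():
--         return ""
--     patch = patch.replace("\r\n", "\n")
--     # Strip any garbage/control characters before the first real diff line
--     lines = patch.split("\n")
--     for i, line in enumerate(lines):
--         if line.startswith("diff --git"):
--             patch = "\n".join(lines[i:])
--             break
--     patch = patch.rstrip() + "\n"  # ensure trailing newline
--     return patch
-- ===== SOURCE B (Python) =====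
-- def process_git_patch(patch: str) -> str:
--     """Clean a git patch: strip control characters, normalize line endings."""
--     if not isinstance(patch, str):
--         return ""
--     if not patch.strip():
--         return ""
--     patch = patch.replace("\r\n", "\n")
--     # Cut to the first line starting with "diff --git" by direct substring
--     # search instead of split/enumerate/join.
--     if not patch.startswith("diff --git"):
--         i = patch.find("\ndiff --git")
--         if i != -1:
--             patch = patch[i + 1:]
--     return patch.rstrip() + "\n"
-- ===== Notes on version B (the rewrite author's own statement) =====
-- stated objective: simpler
-- what changed: Replaces A's split-into-lines + enumerate scan + rejoin with a direct substring search: startswith at position 0, otherwise str.find of a newline-anchored 'diff --git' and a single slice, so no line list is built and no rejoin loop runs.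
import Mathlib
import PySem

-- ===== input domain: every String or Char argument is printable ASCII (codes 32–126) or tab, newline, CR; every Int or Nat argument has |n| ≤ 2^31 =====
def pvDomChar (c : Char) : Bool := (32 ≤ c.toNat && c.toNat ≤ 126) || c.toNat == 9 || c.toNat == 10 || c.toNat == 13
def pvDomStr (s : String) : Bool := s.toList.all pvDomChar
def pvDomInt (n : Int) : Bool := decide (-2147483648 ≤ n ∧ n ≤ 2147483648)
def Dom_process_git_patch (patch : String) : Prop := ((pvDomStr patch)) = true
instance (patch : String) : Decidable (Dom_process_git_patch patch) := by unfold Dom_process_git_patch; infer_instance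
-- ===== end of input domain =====

-- B replaces A's split-into-lines + enumerate-scan + rejoin by a direct substring
-- search for the first line-anchored "diff --git" (objective: simpler).

-- the literal "diff --git" as characters (shared by both ports)
def pvDiffPref : List Char := ['d','i','f','f',' ','-','-','g','i','t']

-- ===== PORT A =====
-- A's `for i, line in enumerate(lines): if line.startswith("diff --git"): patch = "\n".join(lines[i:]); break`:
-- the recursion carries the current suffix `lines[i:]`.
def pvAScan : List (List Char) → Option (List Char)
  | [] => none
  | l :: ls =>
    if PySem.Chars.startswith l pvDiffPref then some (PySem.Chars.join ['\n'] (l :: ls))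
    else pvAScan ls

def process_git_patch (patch : String) : String :=
  if (PySem.Chars.strip patch.toList).isEmpty then "" else
  let cs := PySem.Chars.replace patch.toList ['\r','\n'] ['\n']
  let lines := PySem.Chars.splitOn cs ['\n']
  let cs2 := match pvAScan lines with
    | some r => r
    | none => cs
  String.ofList (PySem.Chars.rstrip cs2 ++ ['\n'])

-- ===== PORT B =====
def process_git_patch_alt (patch : String) : String :=
  if (PySem.Chars.strip patch.toList).isEmpty then "" else
  let cs := PySem.Chars.replace patch.toList ['\r','\n'] ['\n']
  let cs2 :=
    if PySem.Chars.startswith cs pvDiffPref then cs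
    else
      let i := PySem.Chars.find cs ('\n' :: pvDiffPref)
      if i = -1 then cs else PySem.Chars.slice cs (some (i + 1)) none
  String.ofList (PySem.Chars.rstrip cs2 ++ ['\n'])

-- ===== PRECONDITION & SPEC =====
def Spec_process_git_patch (patch : String) (out : String) : Prop := out = process_git_patch_alt patch
instance (patch : String) (out : String) : Decidable (Spec_process_git_patch patch out) := by unfold Spec_process_git_patch; infer_instance

-- ===== CLAIM (what is proved, stated in full; the proofs are below) =====
def Claim_equal_process_git_patch : Prop := ∀ (patch : String), Dom_process_git_patch patch → Spec_process_git_patch patch (process_git_patch patch)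

-- ===== LEMMAS AND PROOFS =====

theorem pvModifyHead_fun_id {α : Type} (l : List α) : List.modifyHead (fun x => x) l = l := by
  cases l <;> simp

-- reference single-character split (what splitOn does for sep = ['\n'])
def pvSplit (c : Char) : List Char → List (List Char)
  | [] => [[]]
  | x :: r => if x = c then [] :: pvSplit c r else (pvSplit c r).modifyHead (x :: ·)

-- B's cut point, as a pure suffix scan: the suffix after the first '\n' that is
-- followed by "diff --git"
def pvFindCut : List Char → Option (List Char)
  | [] => none
  | c :: t => if ('\n' :: pvDiffPref).isPrefixOf (c :: t) then some t else pvFindCut t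

theorem pvSplit_ne_nil (c : Char) (l : List Char) : pvSplit c l ≠ [] := by
  cases l with
  | nil => simp [pvSplit]
  | cons x r =>
    simp only [pvSplit]
    split
    · simp
    · cases h : pvSplit c r with
      | nil => exact absurd h (pvSplit_ne_nil c r)
      | cons a b => simp [List.modifyHead]

theorem pvSplitOn_go_eq (l : List Char) : ∀ (fuel : Nat) (cur : List Char) (acc : List (List Char)),
    l.length ≤ fuel →
    PySem.Chars.splitOn.go ['\n'] fuel l cur acc
      = acc.reverse ++ (pvSplit '\n' l).modifyHead (cur.reverse ++ ·) := by
  induction l with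
  | nil =>
    intro fuel cur acc _
    cases fuel <;> simp [PySem.Chars.splitOn.go, pvSplit, pvModifyHead_fun_id]
  | cons x r ih =>
    intro fuel cur acc hf
    cases fuel with
    | zero => simp at hf
    | succ fuel =>
      by_cases hx : x = '\n'
      · subst hx
        have h1 : PySem.Chars.splitOn.go ['\n'] (fuel+1) ('\n'::r) cur acc
            = PySem.Chars.splitOn.go ['\n'] fuel r [] (cur.reverse :: acc) := by
          simp [PySem.Chars.splitOn.go, List.isPrefixOf]
        rw [h1, ih fuel [] (cur.reverse :: acc) (by simpa using Nat.lt_succ_iff.mp (by simpa using hf))]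
        simp [pvSplit, pvModifyHead_fun_id]
      · have h1 : PySem.Chars.splitOn.go ['\n'] (fuel+1) (x::r) cur acc
            = PySem.Chars.splitOn.go ['\n'] fuel r (x :: cur) acc := by
          simp [PySem.Chars.splitOn.go, List.isPrefixOf, Ne.symm hx]
        rw [h1, ih fuel (x :: cur) acc (by simpa using Nat.lt_succ_iff.mp (by simpa using hf))]
        cases h : pvSplit '\n' r with
        | nil => exact absurd h (pvSplit_ne_nil '\n' r)
        | cons a b => simp [pvSplit, hx, h, List.modifyHead]

theorem pvSplitOn_eq (l : List Char) : PySem.Chars.splitOn l ['\n'] = pvSplit '\n' l := by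
  have := pvSplitOn_go_eq l (l.length + 1) [] [] (by omega)
  simpa [PySem.Chars.splitOn, pvModifyHead_fun_id] using this

theorem pvJoin_pvSplit (l : List Char) : PySem.Chars.join ['\n'] (pvSplit '\n' l) = l := by
  induction l with
  | nil => simp [pvSplit, PySem.Chars.join, List.intercalate]
  | cons x r ih =>
    by_cases hx : x = '\n'
    · subst hx
      cases h : pvSplit '\n' r with
      | nil => exact absurd h (pvSplit_ne_nil '\n' r)
      | cons a b =>
        simp only [pvSplit, if_pos rfl, h, if_true]
        rw [PySem.Chars.join_cons_cons]
        rw [h] at ih; simpa using ih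
    · cases h : pvSplit '\n' r with
      | nil => exact absurd h (pvSplit_ne_nil '\n' r)
      | cons a b =>
        simp only [pvSplit, if_neg hx, h, List.modifyHead]
        rw [h] at ih
        cases b with
        | nil => simp_all [PySem.Chars.join, List.intercalate]
        | cons b0 bs =>
          rw [PySem.Chars.join_cons_cons] at ih ⊢
          simpa using ih

theorem pvHead_pvSplit (c : Char) (l : List Char) :
    (pvSplit c l).headI = l.takeWhile (· ≠ c) := by
  induction l with
  | nil => simp [pvSplit]
  | cons x r ih =>
    by_cases hx : x = c
    · subst hx; simp [pvSplit, List.takeWhile]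
    · cases h : pvSplit c r with
      | nil => exact absurd h (pvSplit_ne_nil c r)
      | cons a b =>
        simp only [pvSplit, if_neg hx, h, List.modifyHead, List.takeWhile]
        rw [h] at ih
        simp_all

-- a '\n'-free pattern is a prefix of a string iff it is a prefix of its first line
theorem pvPrefix_takeWhile (sub : List Char) (hsub : ∀ ch ∈ sub, ch ≠ '\n') :
    ∀ r : List Char, sub.isPrefixOf (r.takeWhile (· ≠ '\n')) = sub.isPrefixOf r := by
  induction sub with
  | nil => intro r; simp [List.isPrefixOf]
  | cons s ss ih =>
    intro r
    cases r with
    | nil => simp [List.takeWhile]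
    | cons y rr =>
      simp only [List.takeWhile]
      by_cases hy : y = '\n'
      · subst hy
        have hs : s ≠ '\n' := hsub s (by simp)
        rw [show decide (('\n':Char) ≠ '\n') = false by simp]
        simp [List.isPrefixOf, hs]
      · rw [show decide (y ≠ '\n') = true by simp [hy]]
        simp only [List.isPrefixOf]
        rw [ih (fun ch hch => hsub ch (by simp [hch])) rr]

theorem pvDiffPref_no_nl : ∀ ch ∈ pvDiffPref, ch ≠ '\n' := by
  intro ch hch
  simp only [pvDiffPref, List.mem_cons, List.not_mem_nil, or_false] at hch
  rcases hch with rfl | rfl | rfl | rfl | rfl | rfl | rfl | rfl | rfl | rfl <;> decide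

-- the central equivalence: A's line scan = B's substring scan
theorem pvMain (l : List Char) :
    (pvAScan (pvSplit '\n' l) = if pvDiffPref.isPrefixOf l then some l else pvFindCut l)
    ∧ (pvAScan ((pvSplit '\n' l).tail) = pvFindCut l) := by
  induction l with
  | nil =>
    constructor
    · simp [pvSplit, pvAScan, pvFindCut, PySem.Chars.startswith, List.isPrefixOf, pvDiffPref]
    · simp [pvSplit, pvAScan, pvFindCut]
  | cons x r ih =>
    by_cases hx : x = '\n'
    · subst hx
      have hpref : pvDiffPref.isPrefixOf ('\n' :: r) = false := by
        simp [pvDiffPref, List.isPrefixOf]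
      have hcut : pvFindCut ('\n' :: r)
          = if pvDiffPref.isPrefixOf r then some r else pvFindCut r := by
        simp [pvFindCut, List.isPrefixOf]
      constructor
      · simp only [pvSplit, if_pos rfl, if_true, pvAScan]
        rw [show PySem.Chars.startswith [] pvDiffPref = false from by decide]
        simp only [Bool.false_eq_true, if_false, hpref, hcut]
        exact ih.1
      · simp only [pvSplit, if_pos rfl, if_true, List.tail_cons, hcut]
        exact ih.1
    · cases h : pvSplit '\n' r with
      | nil => exact absurd h (pvSplit_ne_nil '\n' r)
      | cons a b =>
        have hsplit : pvSplit '\n' (x :: r) = (x :: a) :: b := by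
          simp [pvSplit, hx, h, List.modifyHead]
        have hcut : pvFindCut (x :: r) = pvFindCut r := by
          simp [pvFindCut, List.isPrefixOf, Ne.symm hx]
        have ha : a = r.takeWhile (· ≠ '\n') := by
          have := pvHead_pvSplit '\n' r; rw [h] at this; simpa using this
        have hcond : pvDiffPref.isPrefixOf (x :: a) = pvDiffPref.isPrefixOf (x :: r) := by
          cases hp : pvDiffPref with
          | nil => simp [List.isPrefixOf]
          | cons p ps =>
            simp only [List.isPrefixOf]
            have hps : ps.isPrefixOf a = ps.isPrefixOf r := by
              rw [ha]
              exact pvPrefix_takeWhile ps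
                (fun ch hch => pvDiffPref_no_nl ch (by simp [hp, hch])) r
            rw [hps]
        constructor
        · rw [hsplit]
          simp only [pvAScan, PySem.Chars.startswith, hcond]
          by_cases hc : pvDiffPref.isPrefixOf (x :: r) = true
          · rw [hc]
            simp only [if_pos rfl]
            rw [← hsplit, pvJoin_pvSplit]
            simp
          · rw [Bool.not_eq_true] at hc
            rw [hc]
            simp only [Bool.false_eq_true, if_false, hcut]
            have := ih.2; rw [h] at this; simpa using this
        · rw [hsplit]
          simp only [List.tail_cons, hcut]
          have := ih.2; rw [h] at this; simpa using this

-- B's find-based cut computes pvFindCut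
theorem pvFindGo_cut (cs : List Char) : ∀ (k : Nat),
    (PySem.Chars.find.go ('\n' :: pvDiffPref) cs k = -1 → pvFindCut cs = none)
    ∧ (∀ i : Int, PySem.Chars.find.go ('\n' :: pvDiffPref) cs k = i → i ≠ -1 →
        (k : Int) ≤ i ∧ pvFindCut cs = some (cs.drop (i - k + 1).toNat)) := by
  induction cs with
  | nil =>
    intro k
    constructor
    · intro _; rfl
    · intro i hi hne
      simp [PySem.Chars.find.go, List.isEmpty] at hi
      exact absurd hi.symm hne
  | cons c t ih =>
    intro k
    by_cases hp : ('\n' :: pvDiffPref).isPrefixOf (c :: t) = true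
    · have hgo : PySem.Chars.find.go ('\n' :: pvDiffPref) (c :: t) k = (k : Int) := by
        simp [PySem.Chars.find.go, hp]
      constructor
      · intro h; rw [hgo] at h; omega
      · intro i hi hne
        rw [hgo] at hi
        refine ⟨by omega, ?_⟩
        simp only [pvFindCut, if_pos hp]
        have : (i - k + 1).toNat = 1 := by omega
        rw [this]; simp
    · rw [Bool.not_eq_true] at hp
      have hgo : PySem.Chars.find.go ('\n' :: pvDiffPref) (c :: t) k
          = PySem.Chars.find.go ('\n' :: pvDiffPref) t (k + 1) := by
        simp [PySem.Chars.find.go, hp]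
      have hc : pvFindCut (c :: t) = pvFindCut t := by
        simp only [pvFindCut, hp]; simp
      constructor
      · intro h; rw [hgo] at h
        rw [hc]; exact (ih (k+1)).1 h
      · intro i hi hne
        rw [hgo] at hi
        obtain ⟨hle, heq⟩ := (ih (k+1)).2 i hi hne
        refine ⟨by omega, ?_⟩
        rw [hc, heq]
        have : (i - k + 1).toNat = (i - (k+1) + 1).toNat + 1 := by omega
        rw [this]; simp

-- the middle step of each port, equal for every character list
theorem pvMid_eq (cs : List Char) :
    (match pvAScan (PySem.Chars.splitOn cs ['\n']) with
      | some r => r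
      | none => cs)
    = (if PySem.Chars.startswith cs pvDiffPref then cs
       else
         let i := PySem.Chars.find cs ('\n' :: pvDiffPref)
         if i = -1 then cs else PySem.Chars.slice cs (some (i + 1)) none) := by
  rw [pvSplitOn_eq, (pvMain cs).1]
  simp only [PySem.Chars.startswith]
  by_cases hc : pvDiffPref.isPrefixOf cs = true
  · rw [hc]; simp
  · rw [Bool.not_eq_true] at hc
    rw [hc]
    simp only [Bool.false_eq_true, if_false]
    by_cases hfind : PySem.Chars.find cs ('\n' :: pvDiffPref) = -1
    · have hnone := (pvFindGo_cut cs 0).1 (by simpa [PySem.Chars.find] using hfind)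
      rw [hnone, hfind]
      simp
    · obtain ⟨hle, heq⟩ := (pvFindGo_cut cs 0).2 (PySem.Chars.find cs ('\n' :: pvDiffPref))
        (by simp [PySem.Chars.find]) hfind
      rw [heq]
      rw [if_neg hfind]
      rw [PySem.Chars.slice_eq_listSlice,
        PySem.List.slice_from cs (by omega : (0:Int) ≤ PySem.Chars.find cs ('\n' :: pvDiffPref) + 1)]
      simp

-- ===== VERDICT (by name: the statement is the Claim_ definition above) =====
theorem process_git_patch_spec : Claim_equal_process_git_patch := by
  intro patch _
  unfold Spec_process_git_patch process_git_patch process_git_patch_alt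
  by_cases h : (PySem.Chars.strip patch.toList).isEmpty = true
  · simp [h]
  · rw [Bool.not_eq_true] at h
    simp only [h, Bool.false_eq_true, if_false]
    rw [pvMid_eq]
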